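-- pv_equiv track=rewrite | github.com/miyake8888/test_sample | test0411.py | count_card_combinations
-- ===== SOURCE A (Python) =====
-- def count_card_combinations(N, K):
--     # dp[i][j]: i番目までのカードを使って合計がjになる書き方の数
--     dp = [[0] * (K + 1) for _ in range(4)]
--     dp[0][0] = 1
--
--     for i in range(1, 4):
--         for j in range(K + 1):
--             for k in range(1, N + 1):
--                 if j - k >= 0:
--                     dp[i][j] = dp[i][j] + dp[i - 1][j - k]
--
--     return dp[3][K]
-- ===== SOURCE B (Python) =====
-- def count_card_combinations(N, K):
--     # Sum over the first card a; count (b, c) pairs with b+c = K-a in closed form.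
--     total = 0
--     for a in range(1, min(N, K) + 1):
--         s = K - a
--         lo = max(1, s - N)
--         hi = min(N, s - 1)
--         if hi >= lo:
--             total += hi - lo + 1
--     return total
-- ===== Notes on version B (the rewrite author's own statement) =====
-- stated objective: faster
-- what changed: A fills a 4x(K+1) DP table with a triple nested loop; B loops once over the first card and counts the (b,c) pairs summing to the remainder with a closed-form interval-length formula.
import Mathlib
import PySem

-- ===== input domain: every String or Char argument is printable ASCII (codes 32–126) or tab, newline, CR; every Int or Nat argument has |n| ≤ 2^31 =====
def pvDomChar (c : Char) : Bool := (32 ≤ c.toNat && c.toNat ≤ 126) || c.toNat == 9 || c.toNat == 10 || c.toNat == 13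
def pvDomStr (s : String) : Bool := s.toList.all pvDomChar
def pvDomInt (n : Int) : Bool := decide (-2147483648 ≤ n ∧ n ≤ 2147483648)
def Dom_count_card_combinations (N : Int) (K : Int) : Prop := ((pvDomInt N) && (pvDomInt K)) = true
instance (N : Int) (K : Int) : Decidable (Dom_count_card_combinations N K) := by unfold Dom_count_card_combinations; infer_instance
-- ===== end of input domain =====

-- B replaces A's O(K*N) three-row DP by a single loop over the first card with a
-- closed-form count of the remaining pairs (objective: faster).

-- ===== PORT A =====
-- literal port of A's triple-loop DP over a 4×(K+1) table (pyGetD/pySetD indices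
-- are in range on every admitted input, so the defaults are never taken)
def count_card_combinations (N : Int) (K : Int) : Int :=
  let dp : List (List Int) :=
    (PySem.List.pyRange 0 4 1).map (fun _ => List.replicate (K + 1).toNat 0)
  let dp := PySem.List.pySetD dp 0
    (PySem.List.pySetD (PySem.List.pyGetD dp 0 []) 0 1)   -- dp[0][0] = 1
  let dp := (PySem.List.pyRange 1 4 1).foldl (fun dp i =>
    (PySem.List.pyRange 0 (K + 1) 1).foldl (fun dp j =>
      (PySem.List.pyRange 1 (N + 1) 1).foldl (fun dp k =>
        if j - k ≥ 0 then
          PySem.List.pySetD dp i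
            (PySem.List.pySetD (PySem.List.pyGetD dp i []) j
              (PySem.List.pyGetD (PySem.List.pyGetD dp i []) j 0 +
               PySem.List.pyGetD (PySem.List.pyGetD dp (i - 1) []) (j - k) 0))
        else dp) dp) dp) dp
  PySem.List.pyGetD (PySem.List.pyGetD dp 3 []) K 0

-- ===== PORT B =====
def count_card_combinations_alt (N : Int) (K : Int) : Int :=
  (PySem.List.pyRange 1 (min N K + 1) 1).foldl (fun total a =>
    let s := K - a
    let lo := max 1 (s - N)
    let hi := min N (s - 1)
    if hi ≥ lo then total + (hi - lo + 1) else total) 0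

-- ===== PRECONDITION & SPEC =====
-- Pre_ excludes K < 0, where Python A raises IndexError (dp rows are empty).
def Pre_count_card_combinations (N : Int) (K : Int) : Prop := 0 ≤ K
instance (N : Int) (K : Int) : Decidable (Pre_count_card_combinations N K) := by
  unfold Pre_count_card_combinations; infer_instance
def pvWitness_count_card_combinations : Int × Int := (4, 9)

def Spec_count_card_combinations (N : Int) (K : Int) (out : Int) : Prop :=
  out = count_card_combinations_alt N K
instance (N : Int) (K : Int) (out : Int) : Decidable (Spec_count_card_combinations N K out) := by
  unfold Spec_count_card_combinations; infer_instance

-- ===== CLAIM (what is proved, stated in full; the proofs are below) =====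
def Claim_equal_count_card_combinations : Prop := ∀ (N : Int) (K : Int),
  Dom_count_card_combinations N K → Pre_count_card_combinations N K →
  Spec_count_card_combinations N K (count_card_combinations N K)

-- ===== LEMMAS AND PROOFS =====

def kstep (rp : List Int) (j : Int) (r : List Int) (k : Int) : List Int :=
  if j - k ≥ 0 then
    PySem.List.pySetD r j (PySem.List.pyGetD r j 0 + PySem.List.pyGetD rp (j - k) 0)
  else r

def Srow (rp : List Int) (N j : Int) : Int :=
  ((PySem.List.pyRange 1 (N + 1) 1).map
    (fun k => if j - k ≥ 0 then PySem.List.pyGetD rp (j - k) 0 else 0)).sum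

lemma set_getD_self (l : List Int) (n : Nat) : l.set n (l.getD n 0) = l := by
  by_cases h : n < l.length
  · rw [List.getD_eq_getElem l 0 h]; exact List.set_getElem_self h
  · exact List.set_eq_of_length_le (Nat.le_of_not_lt h)

lemma getD_set_self (l : List Int) (n : Nat) (h : n < l.length) (v : Int) :
    (l.set n v).getD n 0 = v := by
  rw [List.getD_eq_getElem _ 0 (by simpa using h)]
  simp

lemma getD_set_ne (l : List Int) (n m : Nat) (h : m ≠ n) (v : Int) :
    (l.set n v).getD m 0 = l.getD m 0 := by
  simp [List.getD_eq_getElem?_getD, List.getElem?_set_ne (by omega : n ≠ m)]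

lemma kfold_set (rp : List Int) (j : Int) (hj : 0 ≤ j) :
    ∀ (ks : List Int) (r : List Int),
      ks.foldl (kstep rp j) r
        = PySem.List.pySetD r j (PySem.List.pyGetD r j 0 +
            (ks.map (fun k => if j - k ≥ 0 then PySem.List.pyGetD rp (j - k) 0 else 0)).sum) := by
  intro ks
  induction ks with
  | nil =>
    intro r
    simp only [List.foldl_nil, List.map_nil, List.sum_nil, add_zero]
    rw [PySem.List.pySetD_of_nonneg _ _ hj, PySem.List.pyGetD_of_nonneg _ _ hj, set_getD_self]
  | cons k ks ih =>
    intro r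
    simp only [List.foldl_cons]
    rw [ih]
    by_cases hg : j - k ≥ 0
    · simp only [kstep, if_pos hg, List.map_cons, List.sum_cons]
      simp only [PySem.List.pySetD_of_nonneg _ _ hj, PySem.List.pyGetD_of_nonneg _ _ hj]
      by_cases hl : j.toNat < r.length
      · rw [List.set_set, getD_set_self _ _ hl]
        ring_nf
      · rw [List.set_eq_of_length_le (Nat.le_of_not_lt hl),
            List.set_eq_of_length_le (Nat.le_of_not_lt hl),
            List.set_eq_of_length_le (Nat.le_of_not_lt hl)]
    · simp only [kstep, if_neg hg, List.map_cons, List.sum_cons, zero_add]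

lemma fold_lift {A B : Type} (f : A → Int → A) (g : B → Int → B) (emb : B → A)
    (h : ∀ b k, f (emb b) k = emb (g b k)) :
    ∀ (ks : List Int) (b : B), ks.foldl f (emb b) = emb (ks.foldl g b) := by
  intro ks
  induction ks with
  | nil => intro b; rfl
  | cons k ks ih => intro b; simp only [List.foldl_cons, h]; exact ih _

lemma jrow (S : Int → Int) :
    ∀ (n : Nat) (m b : Int) (r : List Int), b - m = (n : Int) → 0 ≤ m →
      b ≤ (r.length : Int) →
      (∀ t : Int, m ≤ t → PySem.List.pyGetD r t 0 = 0) →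
      ∀ t : Int, 0 ≤ t →
        PySem.List.pyGetD
          ((PySem.List.pyRange m b 1).foldl
            (fun r j => PySem.List.pySetD r j (PySem.List.pyGetD r j 0 + S j)) r) t 0
          = if m ≤ t ∧ t < b then S t else PySem.List.pyGetD r t 0 := by
  intro n
  induction n with
  | zero =>
    intro m b r hn hm hlen hzero t ht
    rw [PySem.List.pyRange_one_eq_nil (by omega)]
    simp only [List.foldl_nil]
    rw [if_neg (by omega)]
  | succ n ih =>
    intro m b r hn hm hlen hzero t ht
    rw [PySem.List.pyRange_one_cons (by omega : m < b)]
    simp only [List.foldl_cons]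
    have hmr : m.toNat < r.length := by omega
    have hr' : PySem.List.pySetD r m (PySem.List.pyGetD r m 0 + S m)
        = r.set m.toNat (S m) := by
      rw [PySem.List.pySetD_of_nonneg _ _ hm, hzero m le_rfl, zero_add]
    rw [hr']
    have hlen' : b ≤ ((r.set m.toNat (S m)).length : Int) := by
      rw [List.length_set]; exact hlen
    have hzero' : ∀ t : Int, m + 1 ≤ t → PySem.List.pyGetD (r.set m.toNat (S m)) t 0 = 0 := by
      intro t htm
      rw [PySem.List.pyGetD_of_nonneg _ _ (by omega : (0:Int) ≤ t),
          getD_set_ne _ _ _ (by omega)]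
      have := hzero t (by omega)
      rwa [PySem.List.pyGetD_of_nonneg _ _ (by omega : (0:Int) ≤ t)] at this
    rw [ih (m + 1) b _ (by omega) (by omega) hlen' hzero' t ht]
    by_cases h1 : m + 1 ≤ t ∧ t < b
    · rw [if_pos h1, if_pos (by omega)]
    · rw [if_neg h1]
      by_cases h2 : t = m
      · subst h2
        rw [if_pos (by omega)]
        rw [PySem.List.pyGetD_of_nonneg _ _ ht, getD_set_self _ _ hmr]
      · rw [if_neg (by omega)]
        rw [PySem.List.pyGetD_of_nonneg _ _ ht, PySem.List.pyGetD_of_nonneg _ _ ht,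
            getD_set_ne _ _ _ (by omega)]

lemma getD_replicate_zero (n : Nat) (m : Nat) :
    (List.replicate n (0 : Int)).getD m 0 = 0 := by
  by_cases h : m < n
  · rw [List.getD_eq_getElem _ _ (by simpa using h)]; simp
  · rw [List.getD_eq_default _ _ (by simpa using Nat.le_of_not_lt h)]

lemma sum_ind : ∀ (n : Nat) (a b lo hi : Int), b - a ≤ (n : Int) →
    ((PySem.List.pyRange a b 1).map (fun k => if lo ≤ k ∧ k ≤ hi then (1 : Int) else 0)).sum
      = max 0 (min (b - 1) hi - max a lo + 1) := by
  intro n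
  induction n with
  | zero =>
    intro a b lo hi hn
    rw [PySem.List.pyRange_one_eq_nil (by omega)]
    simp only [List.map_nil, List.sum_nil]
    omega
  | succ n ih =>
    intro a b lo hi hn
    by_cases hab : b ≤ a
    · rw [PySem.List.pyRange_one_eq_nil hab]
      simp only [List.map_nil, List.sum_nil]
      omega
    · rw [PySem.List.pyRange_one_cons (by omega : a < b)]
      simp only [List.map_cons, List.sum_cons]
      rw [ih (a + 1) b lo hi (by omega)]
      split_ifs with h <;> omega

lemma pyGetD_replicate_zero (n : Nat) (t : Int) (ht : 0 ≤ t) :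
    PySem.List.pyGetD (List.replicate n (0 : Int)) t 0 = 0 := by
  rw [PySem.List.pyGetD_of_nonneg _ _ ht]
  try exact getD_replicate_zero n t.toNat


lemma row_val (rp : List Int) (N K : Int) (hK : 0 ≤ K) (t : Int) (ht : 0 ≤ t) :
    PySem.List.pyGetD
      ((PySem.List.pyRange 0 (K + 1) 1).foldl
        (fun r j => (PySem.List.pyRange 1 (N + 1) 1).foldl (kstep rp j) r)
        (List.replicate (K + 1).toNat (0 : Int))) t 0
    = if t ≤ K then Srow rp N t else 0 := by
  rw [PySem.List.foldl_congr_mem _ _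
    (fun r j => PySem.List.pySetD r j (PySem.List.pyGetD r j 0 + Srow rp N j)) _
    (by intro acc x hx
        have hx' := PySem.List.mem_pyRange_one.1 hx
        exact kfold_set rp x (by omega) _ acc)]
  rw [jrow (Srow rp N) (K + 1).toNat 0 (K + 1) _ (by omega) (by omega)
      (by rw [List.length_replicate]; omega)
      (by intro t ht; exact pyGetD_replicate_zero _ t (by omega))
      t ht]
  by_cases h : t ≤ K
  · rw [if_pos ⟨ht, by omega⟩, if_pos h]
  · rw [if_neg (by omega), if_neg h]
    exact pyGetD_replicate_zero _ t ht

def JK (N K : Int) (rp : List Int) : List Int :=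
  (PySem.List.pyRange 0 (K + 1) 1).foldl
    (fun r j => (PySem.List.pyRange 1 (N + 1) 1).foldl (kstep rp j) r)
    (List.replicate (K + 1).toNat (0 : Int))

lemma phase1 (N : Int) (r0 r2 r3 : List Int) :
    ∀ (js : List Int) (r1 : List Int),
      js.foldl (fun dp j => (PySem.List.pyRange 1 (N + 1) 1).foldl (fun dp k =>
        if j - k ≥ 0 then
          PySem.List.pySetD dp 1 (PySem.List.pySetD (PySem.List.pyGetD dp 1 []) j
            (PySem.List.pyGetD (PySem.List.pyGetD dp 1 []) j 0 +
             PySem.List.pyGetD (PySem.List.pyGetD dp (1 - 1) []) (j - k) 0)) else dp) dp)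
        [r0, r1, r2, r3]
      = [r0, js.foldl (fun r j => (PySem.List.pyRange 1 (N + 1) 1).foldl (kstep r0 j) r) r1, r2, r3] :=
  fold_lift _ _ (fun r => [r0, r, r2, r3]) (by
    intro r1 j
    exact fold_lift _ _ (fun r => [r0, r, r2, r3]) (by
      intro r k
      unfold kstep
      split_ifs with hg <;> rfl) _ r1)

lemma phase2 (N : Int) (r0 r1 r3 : List Int) :
    ∀ (js : List Int) (r2 : List Int),
      js.foldl (fun dp j => (PySem.List.pyRange 1 (N + 1) 1).foldl (fun dp k =>
        if j - k ≥ 0 then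
          PySem.List.pySetD dp 2 (PySem.List.pySetD (PySem.List.pyGetD dp 2 []) j
            (PySem.List.pyGetD (PySem.List.pyGetD dp 2 []) j 0 +
             PySem.List.pyGetD (PySem.List.pyGetD dp (2 - 1) []) (j - k) 0)) else dp) dp)
        [r0, r1, r2, r3]
      = [r0, r1, js.foldl (fun r j => (PySem.List.pyRange 1 (N + 1) 1).foldl (kstep r1 j) r) r2, r3] :=
  fold_lift _ _ (fun r => [r0, r1, r, r3]) (by
    intro r2 j
    exact fold_lift _ _ (fun r => [r0, r1, r, r3]) (by
      intro r k
      unfold kstep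
      split_ifs with hg <;> rfl) _ r2)

lemma phase3 (N : Int) (r0 r1 r2 : List Int) :
    ∀ (js : List Int) (r3 : List Int),
      js.foldl (fun dp j => (PySem.List.pyRange 1 (N + 1) 1).foldl (fun dp k =>
        if j - k ≥ 0 then
          PySem.List.pySetD dp 3 (PySem.List.pySetD (PySem.List.pyGetD dp 3 []) j
            (PySem.List.pyGetD (PySem.List.pyGetD dp 3 []) j 0 +
             PySem.List.pyGetD (PySem.List.pyGetD dp (3 - 1) []) (j - k) 0)) else dp) dp)
        [r0, r1, r2, r3]
      = [r0, r1, r2, js.foldl (fun r j => (PySem.List.pyRange 1 (N + 1) 1).foldl (kstep r2 j) r) r3] :=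
  fold_lift _ _ (fun r => [r0, r1, r2, r]) (by
    intro r3 j
    exact fold_lift _ _ (fun r => [r0, r1, r2, r]) (by
      intro r k
      unfold kstep
      split_ifs with hg <;> rfl) _ r3)

lemma portA_eq (N K : Int) :
    count_card_combinations N K
      = PySem.List.pyGetD
          (JK N K (JK N K (JK N K (PySem.List.pySetD (List.replicate (K + 1).toNat (0 : Int)) 0 1)))) K 0 := by
  unfold count_card_combinations
  rw [show PySem.List.pyRange 0 4 1 = [0, 1, 2, 3] from rfl]
  simp only [List.map_cons, List.map_nil]
  rw [show PySem.List.pyRange 1 4 1 = [1, 2, 3] from rfl]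
  simp only [List.foldl_cons, List.foldl_nil]
  rw [show (PySem.List.pySetD
        [List.replicate (K + 1).toNat (0 : Int), List.replicate (K + 1).toNat 0,
         List.replicate (K + 1).toNat 0, List.replicate (K + 1).toNat 0] 0
        (PySem.List.pySetD (PySem.List.pyGetD
          [List.replicate (K + 1).toNat (0 : Int), List.replicate (K + 1).toNat 0,
           List.replicate (K + 1).toNat 0, List.replicate (K + 1).toNat 0] 0 []) 0 1))
      = [PySem.List.pySetD (List.replicate (K + 1).toNat (0 : Int)) 0 1,
         List.replicate (K + 1).toNat 0, List.replicate (K + 1).toNat 0,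
         List.replicate (K + 1).toNat 0] from rfl]
  rw [phase1, phase2, phase3]
  rfl

lemma hr0 (K : Int) (hK : 0 ≤ K) (x : Int) (hx : 0 ≤ x) :
    PySem.List.pyGetD (PySem.List.pySetD (List.replicate (K + 1).toNat (0 : Int)) 0 1) x 0
      = if x = 0 then 1 else 0 := by
  rw [PySem.List.pySetD_of_nonneg _ _ (le_refl (0 : Int)),
      PySem.List.pyGetD_of_nonneg _ _ hx]
  by_cases h : x = 0
  · subst h
    rw [if_pos rfl]
    exact getD_set_self _ _ (by simp [List.length_replicate]; omega) 1
  · rw [if_neg h, getD_set_ne _ _ _ (by omega)]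
    exact getD_replicate_zero _ _

lemma JK_val (N K : Int) (hK : 0 ≤ K) (rp : List Int) (t : Int) (ht : 0 ≤ t) :
    PySem.List.pyGetD (JK N K rp) t 0 = if t ≤ K then Srow rp N t else 0 :=
  row_val rp N K hK t ht

-- row 1: indicator of 1 ≤ j ≤ N
lemma hS1 (N K : Int) (hK : 0 ≤ K) (j : Int) :
    Srow (PySem.List.pySetD (List.replicate (K + 1).toNat (0 : Int)) 0 1) N j
      = max 0 (min N j - max 1 j + 1) := by
  unfold Srow
  rw [List.map_congr_left (g := fun k => if j ≤ k ∧ k ≤ j then (1 : Int) else 0)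
    (by intro k hk
        dsimp only
        have hk' := PySem.List.mem_pyRange_one.1 hk
        by_cases hg : j - k ≥ 0
        · rw [if_pos hg, hr0 K hK _ (by omega)]
          split_ifs <;> omega
        · rw [if_neg hg, if_neg (by omega)])]
  rw [sum_ind (N + 1 - 1).toNat 1 (N + 1) j j (by omega)]
  omega

-- row 2: number of pairs
lemma hS2 (N K : Int) (hK : 0 ≤ K) (j : Int) (hjK : j ≤ K) :
    Srow (JK N K (PySem.List.pySetD (List.replicate (K + 1).toNat (0 : Int)) 0 1)) N j
      = max 0 (min N (j - 1) - max 1 (j - N) + 1) := by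
  unfold Srow
  rw [List.map_congr_left (g := fun k => if j - N ≤ k ∧ k ≤ j - 1 then (1 : Int) else 0)
    (by intro k hk
        dsimp only
        have hk' := PySem.List.mem_pyRange_one.1 hk
        by_cases hg : j - k ≥ 0
        · rw [if_pos hg, JK_val N K hK _ _ (by omega), if_pos (by omega),
              hS1 N K hK (j - k)]
          split_ifs <;> omega
        · rw [if_neg hg, if_neg (by omega)])]
  rw [sum_ind (N + 1 - 1).toNat 1 (N + 1) (j - N) (j - 1) (by omega)]
  omega

-- row 3 read at K, as a sum of closed-form pair counts
lemma hS3 (N K : Int) (hK : 0 ≤ K) :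
    Srow (JK N K (JK N K (PySem.List.pySetD (List.replicate (K + 1).toNat (0 : Int)) 0 1))) N K
      = ((PySem.List.pyRange 1 (N + 1) 1).map
          (fun k => max 0 (min N (K - k - 1) - max 1 (K - k - N) + 1))).sum := by
  unfold Srow
  rw [List.map_congr_left
    (g := fun k => max 0 (min N (K - k - 1) - max 1 (K - k - N) + 1))
    (by intro k hk
        dsimp only
        have hk' := PySem.List.mem_pyRange_one.1 hk
        by_cases hg : K - k ≥ 0
        · rw [if_pos hg, JK_val N K hK _ _ (by omega), if_pos (by omega),
              hS2 N K hK (K - k) (by omega)]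
        · rw [if_neg hg]
          omega)]

lemma portB_eq (N K : Int) :
    count_card_combinations_alt N K
      = ((PySem.List.pyRange 1 (min N K + 1) 1).map
          (fun a => max 0 (min N (K - a - 1) - max 1 (K - a - N) + 1))).sum := by
  unfold count_card_combinations_alt
  rw [PySem.List.foldl_congr_mem _ _
    (fun total a => total + max 0 (min N (K - a - 1) - max 1 (K - a - N) + 1)) _
    (by intro acc a _
        dsimp only
        split_ifs with h <;> omega)]
  rw [PySem.List.foldl_add]
  omega

lemma sum_trunc (N K : Int) (hK : 0 ≤ K) :
    ((PySem.List.pyRange 1 (N + 1) 1).map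
        (fun a => max 0 (min N (K - a - 1) - max 1 (K - a - N) + 1))).sum
      = ((PySem.List.pyRange 1 (min N K + 1) 1).map
          (fun a => max 0 (min N (K - a - 1) - max 1 (K - a - N) + 1))).sum := by
  rcases le_total N K with h | h
  · rw [min_eq_left h]
  · rw [min_eq_right h,
        PySem.List.pyRange_one_append 1 (K + 1) (N + 1) (by omega) (by omega),
        List.map_append, List.sum_append]
    have hz : ((PySem.List.pyRange (K + 1) (N + 1) 1).map
        (fun a => max 0 (min N (K - a - 1) - max 1 (K - a - N) + 1))).sum = 0 := by
      apply List.sum_eq_zero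
      intro x hx
      obtain ⟨a, ha, rfl⟩ := List.mem_map.1 hx
      have ha' := PySem.List.mem_pyRange_one.1 ha
      omega
    rw [hz, add_zero]

lemma main_lemma (N K : Int) (hK : 0 ≤ K) :
    count_card_combinations N K = count_card_combinations_alt N K := by
  rw [portA_eq, portB_eq, JK_val N K hK _ K hK, if_pos le_rfl, hS3 N K hK,
      sum_trunc N K hK]


-- ===== VERDICT (by name: the statement is the Claim_ definition above) =====
theorem count_card_combinations_spec : Claim_equal_count_card_combinations := by
  intro N K _ hpre
  exact main_lemma N K hpre
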